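-- pv_equiv track=rewrite | github.com/MalcolmorianVII/Bio_pyscripts | prog_110.py | dna_subseq
-- ===== SOURCE A (Python) =====
-- def translate(cod):
--     """Given a codon translate it using the codon table"""
--     cod = cod.upper()
--     tc = {"GCT": "A", "GCC": "A", "GCA": "A", "GCG": "A",
--           "TGT": "C", "TGC": "C",
--           "GAT": "D", "GAC": "D",
--           "GAA": "E", "GAG": "E",
--           "TTT": "F", "TTC": "F",
--           "GGT": "G", "GGC": "G", "GGA": "G", "GGG": "G",
--           "CAT": "H", "CAC": "H",
--           "ATA": "I", "ATT": "I", "ATC": "I",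
--           "AAA": "K", "AAG": "K",
--           "TTA": "L", "TTG": "L", "CTT": "L", "CTC": "L", "CTA": "L", "CTG": "L",
--           "ATG": "M", "AAT": "N", "AAC": "N",
--           "CCT": "P", "CCC": "P", "CCA": "P", "CCG": "P",
--           "CAA": "Q", "CAG": "Q",
--           "CGT": "R", "CGC": "R", "CGA": "R", "CGG": "R", "AGA": "R", "AGG": "R",
--           "TCT": "S", "TCC": "S", "TCA": "S", "TCG": "S", "AGT": "S", "AGC": "S",
--           "ACT": "T", "ACC": "T", "ACA": "T", "ACG": "T",
--           "GTT": "V", "GTC": "V", "GTA": "V", "GTG": "V",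
--           "TGG": "W",
--           "TAT": "Y", "TAC": "Y",
--           "TAA": "_", "TAG": "_", "TGA": "_"}
--     return tc[cod] if cod in tc else None
--
-- def dna_subseq(seq, aa):
--     """Reads an AA & DNA seq & prints list of all sub_seqs of DNA seq that encode given aa seq"""
--     seq = seq.upper()
--     subseqs = []
--     aa_seq = ''
--     for pos in range(0, len(seq) - 2):
--         cod = seq[pos:pos + 3]
--         if translate(cod) == '_':
--             subseqs.append(aa_seq)  # if stop codon exists tu
--             aa_seq = ''
--         else:
--             aa_seq += translate(cod)
--
--     return subseqs
-- ===== SOURCE B (Python) =====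
-- _AA64 = "KNKNTTTTRSRSIIMIQHQHPPPPRRRRLLLLEDEDAAAAGGGGVVVV_Y_YSSSS_CWCLFLF"
-- _BASE = {"A": 0, "C": 1, "G": 2, "T": 3}
--
-- def dna_subseq(seq, aa):
--     """Reads an AA & DNA seq & prints list of all sub_seqs of DNA seq that encode given aa seq"""
--     seq = seq.upper()
--     vals = [_BASE.get(c) for c in seq]
--
--     def aa_of(i):
--         a, b, c = vals[i], vals[i + 1], vals[i + 2]
--         if a is None or b is None or c is None:
--             return None
--         return _AA64[16 * a + 4 * b + c]
--
--     protein = ''.join(aa_of(i) for i in range(len(seq) - 2))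
--     return protein.split('_')[:-1]
-- ===== Notes on version B (the rewrite author's own statement) =====
-- stated objective: alternative
-- what changed: Replaces the dict-lookup flush-on-stop accumulator loop by arithmetic codon encoding (base->0..3, index 16a+4b+c into a 64-char amino-acid string) building the whole translated string once and returning protein.split('_')[:-1].
import Mathlib
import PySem

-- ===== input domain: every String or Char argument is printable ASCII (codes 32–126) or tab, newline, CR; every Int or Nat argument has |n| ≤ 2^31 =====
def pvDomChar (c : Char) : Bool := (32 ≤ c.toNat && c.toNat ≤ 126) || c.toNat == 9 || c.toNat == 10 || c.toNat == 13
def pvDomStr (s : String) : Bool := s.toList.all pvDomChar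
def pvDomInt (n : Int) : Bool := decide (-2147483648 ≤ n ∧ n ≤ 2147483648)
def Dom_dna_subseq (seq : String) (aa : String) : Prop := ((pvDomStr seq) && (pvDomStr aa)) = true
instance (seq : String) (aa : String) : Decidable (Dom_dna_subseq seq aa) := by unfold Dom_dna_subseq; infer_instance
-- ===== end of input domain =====

-- B replaces A's dict-lookup flush-on-stop accumulator loop by arithmetic codon encoding (base -> 0..3,
-- index 16a+4b+c into a 64-char amino-acid string), building one translated string and splitting it at '_'
-- with the trailing piece dropped (alternative algorithm; return value only).

-- ===== PORT A =====
-- the codon table 'tc' of pyTranslate (a dict literal, insertion order)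
def codonTable : PySem.Dict String String := ⟨[
  ("GCT", "A"), ("GCC", "A"), ("GCA", "A"), ("GCG", "A"),
  ("TGT", "C"), ("TGC", "C"),
  ("GAT", "D"), ("GAC", "D"),
  ("GAA", "E"), ("GAG", "E"),
  ("TTT", "F"), ("TTC", "F"),
  ("GGT", "G"), ("GGC", "G"), ("GGA", "G"), ("GGG", "G"),
  ("CAT", "H"), ("CAC", "H"),
  ("ATA", "I"), ("ATT", "I"), ("ATC", "I"),
  ("AAA", "K"), ("AAG", "K"),
  ("TTA", "L"), ("TTG", "L"), ("CTT", "L"), ("CTC", "L"), ("CTA", "L"), ("CTG", "L"),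
  ("ATG", "M"), ("AAT", "N"), ("AAC", "N"),
  ("CCT", "P"), ("CCC", "P"), ("CCA", "P"), ("CCG", "P"),
  ("CAA", "Q"), ("CAG", "Q"),
  ("CGT", "R"), ("CGC", "R"), ("CGA", "R"), ("CGG", "R"), ("AGA", "R"), ("AGG", "R"),
  ("TCT", "S"), ("TCC", "S"), ("TCA", "S"), ("TCG", "S"), ("AGT", "S"), ("AGC", "S"),
  ("ACT", "T"), ("ACC", "T"), ("ACA", "T"), ("ACG", "T"),
  ("GTT", "V"), ("GTC", "V"), ("GTA", "V"), ("GTG", "V"),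
  ("TGG", "W"),
  ("TAT", "Y"), ("TAC", "Y"),
  ("TAA", "_"), ("TAG", "_"), ("TGA", "_")]⟩

-- pyTranslate(cod): 'tc[cod] if cod in tc else None' is exactly the dict lookup
def pyTranslate (cod : String) : Option String :=
  PySem.Dict.get? codonTable (PySem.Str.upper cod)

-- A's loop: state (subseqs, aa_seq); '.getD ""' is unreachable inside Pre_ (Python raises TypeError there: aa_seq += None)
def dna_subseq (seq : String) (aa : String) : List String :=
  let s := PySem.Str.upper seq
  (List.foldl (fun (st : List String × String) pos =>
      let cod := PySem.Str.slice s (some pos) (some (pos + 3))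
      if pyTranslate cod = some "_" then (st.1 ++ [st.2], "")
      else (st.1, st.2 ++ (pyTranslate cod).getD ""))
    ([], "") (PySem.List.pyRange 0 (PySem.Str.len s - 2) 1)).1

-- ===== PORT B =====
-- _AA64: amino acid of the codon with code 16a+4b+c where A,C,G,T -> 0,1,2,3
def aa64 : String := "KNKNTTTTRSRSIIMIQHQHPPPPRRRRLLLLEDEDAAAAGGGGVVVV_Y_YSSSS_CWCLFLF"

-- _BASE = {"A":0,"C":1,"G":2,"T":3}
def baseDict : PySem.Dict String Int := ⟨[("A", 0), ("C", 1), ("G", 2), ("T", 3)]⟩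

-- aa_of(i): vals[i..i+2]; index totalised by '.getD none' — out-of-range never happens for i in range(len-2)
def bAaOf (vals : List (Option Int)) (i : Int) : Option String :=
  match (PySem.List.pyGet? vals i).getD none, (PySem.List.pyGet? vals (i + 1)).getD none,
        (PySem.List.pyGet? vals (i + 2)).getD none with
  | some a, some b, some c => (PySem.Str.pyGet? aa64 (16 * a + 4 * b + c)).map (fun ch => String.ofList [ch])
  | _, _, _ => none

-- ''.join(...).split('_')[:-1]; '.getD ""' is unreachable inside Pre_ (Python's join raises TypeError on None)
def dna_subseq_alt (seq : String) (aa : String) : List String :=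
  let s := PySem.Str.upper seq
  let vals := s.toList.map (fun c => PySem.Dict.get? baseDict (String.ofList [c]))
  let protein := PySem.Str.join ""
    ((PySem.List.pyRange 0 (PySem.Str.len s - 2) 1).map (fun i => (bAaOf vals i).getD ""))
  PySem.List.slice ((PySem.Str.split? protein "_").getD []) none (some (-1))

-- ===== PRECONDITION & SPEC =====
-- Pre_ excludes exactly the inputs on which A raises TypeError (aa_seq += None): a sequence of length >= 3
-- with a character that is not a DNA base, so some 3-letter window falls outside the codon table.
def Pre_dna_subseq (seq : String) (aa : String) : Prop :=
  seq.toList.length < 3 ∨ seq.toList.all (fun c => PySem.Chars.upperChar c ∈ ['A', 'C', 'G', 'T']) = true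
instance (seq : String) (aa : String) : Decidable (Pre_dna_subseq seq aa) := by unfold Pre_dna_subseq; infer_instance

def pvWitness_dna_subseq : String × String := ("atgTAAtga", "MC")

def Spec_dna_subseq (seq : String) (aa : String) (out : List String) : Prop := out = dna_subseq_alt seq aa
instance (seq : String) (aa : String) (out : List String) : Decidable (Spec_dna_subseq seq aa out) := by unfold Spec_dna_subseq; infer_instance

-- ===== CLAIM (what is proved, stated in full; the proofs are below) =====
def Claim_equal_dna_subseq : Prop := ∀ (seq : String) (aa : String), Dom_dna_subseq seq aa → Pre_dna_subseq seq aa → Spec_dna_subseq seq aa (dna_subseq seq aa)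

-- ===== LEMMAS AND PROOFS =====

-- structural form of Python's str.split('_') (no fuel); pre is the piece being accumulated
def mySplit (pre : List Char) : List Char → List (List Char)
  | [] => [pre]
  | c :: rest => if c = '_' then pre :: mySplit [] rest else mySplit (pre ++ [c]) rest

theorem mySplit_ne_nil (pre l) : mySplit pre l ≠ [] := by
  induction l generalizing pre with
  | nil => simp [mySplit]
  | cons c rest ih => simp only [mySplit]; split <;> simp [ih]

theorem splitOn_go_eq (l : List Char) : ∀ (fuel : Nat) (cur : List Char) (acc : List (List Char)),
    l.length < fuel →
    PySem.Chars.splitOn.go ['_'] fuel l cur acc = acc.reverse ++ mySplit cur.reverse l := by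
  induction l with
  | nil =>
      intro fuel cur acc h
      match fuel with
      | fuel + 1 => simp [PySem.Chars.splitOn.go, mySplit]
  | cons c rest ih =>
      intro fuel cur acc h
      match fuel with
      | fuel + 1 =>
        by_cases hc : c = '_'
        · subst hc
          rw [show PySem.Chars.splitOn.go ['_'] (fuel + 1) ('_' :: rest) cur acc
              = PySem.Chars.splitOn.go ['_'] fuel rest [] (cur.reverse :: acc) from by
              simp [PySem.Chars.splitOn.go, List.isPrefixOf]]
          rw [ih fuel [] (cur.reverse :: acc) (by simpa using h)]
          simp [mySplit]
        · rw [show PySem.Chars.splitOn.go ['_'] (fuel + 1) (c :: rest) cur acc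
              = PySem.Chars.splitOn.go ['_'] fuel rest (c :: cur) acc from by
              simp [PySem.Chars.splitOn.go, List.isPrefixOf, Ne.symm hc]]
          rw [ih fuel (c :: cur) acc (by simpa using h)]
          simp [mySplit, hc]

theorem splitOn_eq_mySplit (l : List Char) :
    PySem.Chars.splitOn l ['_'] = mySplit [] l := by
  rw [PySem.Chars.splitOn, splitOn_go_eq l (l.length + 1) [] [] (by omega)]
  simp

theorem join_nil_cons (x : List Char) (l : List (List Char)) :
    PySem.Chars.join [] (x :: l) = x ++ PySem.Chars.join [] l := by
  cases l <;> simp [PySem.Chars.join, List.intercalate]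

-- split-step equations for mySplit
theorem mySplit_stop (pre J) : mySplit pre ('_' :: J) = pre :: mySplit [] J := by simp [mySplit]
theorem mySplit_ext (pre c J) (h : c ≠ '_') : mySplit pre (c :: J) = mySplit (pre ++ [c]) J := by
  simp [mySplit, h]

-- A's accumulator loop over 1-character strings is split-at-'_' with the last piece dropped
theorem fold_eq_mySplit (us : List String) (h1 : ∀ u ∈ us, u.toList.length = 1) :
    ∀ (subs : List String) (acc : String),
    (List.foldl (fun (st : List String × String) u =>
        if u = "_" then (st.1 ++ [st.2], "") else (st.1, st.2 ++ u)) (subs, acc) us).1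
      = subs ++ (mySplit acc.toList (PySem.Chars.join [] (us.map String.toList))).dropLast.map String.ofList := by
  induction us with
  | nil => intro subs acc; simp [PySem.Chars.join, List.intercalate, mySplit]
  | cons u us ih =>
      intro subs acc
      obtain ⟨c, hc⟩ : ∃ c, u.toList = [c] := by
        have := h1 u (by simp)
        match hu : u.toList with
        | [c] => exact ⟨c, rfl⟩
        | [] | _ :: _ :: _ => simp [hu] at this
      have hih := ih (fun v hv => h1 v (by simp [hv]))
      simp only [List.map_cons, join_nil_cons, hc, List.cons_append, List.nil_append]
      by_cases h_ : c = '_'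
      · subst h_
        have hu' : u = "_" := by rw [← String.ofList_toList (s := u), hc]
        rw [List.foldl_cons, if_pos hu', hih, mySplit_stop,
            List.dropLast_cons_of_ne_nil (mySplit_ne_nil _ _)]
        have hnil : ("" : String).toList = ([] : List Char) := rfl
        simp [String.ofList_toList, hnil]
      · have hu' : u ≠ "_" := by
          intro hh
          have : u.toList = ['_'] := by rw [hh]; rfl
          rw [hc] at this; simp at this; exact h_ this
        rw [List.foldl_cons, if_neg hu', hih, mySplit_ext _ _ _ h_]
        have hacc : (acc ++ u).toList = acc.toList ++ [c] := by
          rw [String.toList_append, hc]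
        rw [hacc]

-- every value the codon table yields is a single character
theorem pyTranslate_len (cod u : String) (h : pyTranslate cod = some u) : u.toList.length = 1 := by
  have hmem : ∃ p ∈ codonTable.items, p.2 = u := by
    simp only [pyTranslate, PySem.Dict.get?, Option.map_eq_some_iff] at h
    obtain ⟨p, hp, hpu⟩ := h
    exact ⟨p, List.mem_of_find?_eq_some hp, hpu⟩
  obtain ⟨p, hp, hpu⟩ := hmem
  subst hpu
  have : codonTable.items.all (fun p => p.2.toList.length == 1) = true := by decide
  simpa using List.all_eq_true.mp this p hp

-- DNA-base facts: bases are upper-case fixed points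
theorem upperChar_base {c : Char} (h : c ∈ ['A', 'C', 'G', 'T']) : PySem.Chars.upperChar c = c := by
  fin_cases h <;> decide

-- every base triple is in the codon table (64 cases)
set_option maxHeartbeats 2000000 in
theorem lookup_base : ∀ c1 ∈ ['A', 'C', 'G', 'T'], ∀ c2 ∈ ['A', 'C', 'G', 'T'], ∀ c3 ∈ ['A', 'C', 'G', 'T'],
    (PySem.Dict.get? codonTable (String.ofList [c1, c2, c3])).isSome = true := by
  intro c1 h1 c2 h2 c3 h3
  fin_cases h1 <;> fin_cases h2 <;> fin_cases h3 <;> decide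

-- for a base triple, A's dict lookup equals B's arithmetic lookup (64 cases)
set_option maxHeartbeats 2000000 in
theorem lookup_base_eq : ∀ c1 ∈ ['A', 'C', 'G', 'T'], ∀ c2 ∈ ['A', 'C', 'G', 'T'], ∀ c3 ∈ ['A', 'C', 'G', 'T'],
    PySem.Dict.get? codonTable (String.ofList [c1, c2, c3])
      = (match PySem.Dict.get? baseDict (String.ofList [c1]), PySem.Dict.get? baseDict (String.ofList [c2]),
               PySem.Dict.get? baseDict (String.ofList [c3]) with
         | some a, some b, some c => (PySem.Str.pyGet? aa64 (16 * a + 4 * b + c)).map (fun ch => String.ofList [ch])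
         | _, _, _ => none) := by
  intro c1 h1 c2 h2 c3 h3
  fin_cases h1 <;> fin_cases h2 <;> fin_cases h3 <;> decide

-- inside Pre_, every 3-letter window of the upper-cased sequence is in the codon table
theorem pre_isSome (seq : String) (aa : String) (hpre : Pre_dna_subseq seq aa) :
    ∀ i ∈ PySem.List.pyRange 0 (PySem.Str.len (PySem.Str.upper seq) - 2) 1,
      (pyTranslate (PySem.Str.slice (PySem.Str.upper seq) (some i) (some (i + 3)))).isSome = true := by
  intro i hi
  rw [PySem.List.mem_pyRange_one] at hi
  obtain ⟨h0, hlt⟩ := hi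
  have hlen_eq : PySem.Str.len (PySem.Str.upper seq) = (seq.toList.length : Int) := by
    rw [PySem.Str.len_eq, PySem.Str.toList_upper, PySem.Chars.upper, List.length_map]
  rw [hlen_eq] at hlt
  cases hpre with
  | inl hlen => omega
  | inr hallb =>
      have hall : ∀ c ∈ seq.toList, PySem.Chars.upperChar c ∈ ['A', 'C', 'G', 'T'] :=
        fun c hc => by simpa using List.all_eq_true.mp hallb c hc
      set j := i.toNat with hj
      have hij : i = (j : Int) := (Int.toNat_of_nonneg h0).symm
      have hwl : (PySem.Str.slice (PySem.Str.upper seq) (some i) (some (i + 3))).toList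
          = PySem.List.slice (PySem.Str.upper seq).toList (some i) (some (i + 3)) := by
        simp
      have hww : PySem.List.slice (PySem.Str.upper seq).toList (some i) (some (i + 3))
          = (((PySem.Str.upper seq).toList).drop j).take 3 := by
        rw [hij, show ((j : Int) + 3) = ((j : Int) + ((3 : Nat) : Int)) from by norm_cast]
        exact PySem.List.slice_natCast_add _ j 3
      have hcs : (PySem.Str.upper seq).toList = seq.toList.map PySem.Chars.upperChar := by
        rw [PySem.Str.toList_upper, PySem.Chars.upper]
      have hlen3 : ((((PySem.Str.upper seq).toList).drop j).take 3).length = 3 := by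
        rw [List.length_take, List.length_drop, hcs, List.length_map]
        omega
      obtain ⟨c1, c2, c3, hw3⟩ : ∃ a b c, (((PySem.Str.upper seq).toList).drop j).take 3 = [a, b, c] := by
        match hm : (((PySem.Str.upper seq).toList).drop j).take 3, hlen3 with
        | [a, b, c], _ => exact ⟨a, b, c, rfl⟩
      have hbase : ∀ x ∈ [c1, c2, c3], x ∈ ['A', 'C', 'G', 'T'] := by
        intro x hx
        have hx' : x ∈ PySem.List.slice (PySem.Str.upper seq).toList (some i) (some (i + 3)) := by
          rw [hww, hw3]; exact hx
        have hxcs := PySem.List.mem_of_mem_slice _ _ _ hx'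
        rw [hcs] at hxcs
        obtain ⟨d, hd, hdx⟩ := List.mem_map.mp hxcs
        exact hdx ▸ hall d hd
      have htl : (PySem.Str.upper (PySem.Str.slice (PySem.Str.upper seq) (some i) (some (i + 3)))).toList
          = [c1, c2, c3] := by
        rw [PySem.Str.toList_upper, PySem.Chars.upper, hwl, hww, hw3]
        simp [upperChar_base (hbase c1 (by simp)), upperChar_base (hbase c2 (by simp)),
          upperChar_base (hbase c3 (by simp))]
      have hup : PySem.Str.upper (PySem.Str.slice (PySem.Str.upper seq) (some i) (some (i + 3)))
          = String.ofList [c1, c2, c3] := by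
        rw [← String.ofList_toList
          (s := PySem.Str.upper (PySem.Str.slice (PySem.Str.upper seq) (some i) (some (i + 3)))), htl]
      simp only [pyTranslate]
      rw [hup]
      exact lookup_base c1 (hbase c1 (by simp)) c2 (hbase c2 (by simp)) c3 (hbase c3 (by simp))

-- inside Pre_, B's arithmetic lookup at i agrees with A's dict translation of the window at i
theorem pre_bAaOf_eq (seq : String) (aa : String) (hpre : Pre_dna_subseq seq aa) :
    ∀ i ∈ PySem.List.pyRange 0 (PySem.Str.len (PySem.Str.upper seq) - 2) 1,
      bAaOf ((PySem.Str.upper seq).toList.map (fun c => PySem.Dict.get? baseDict (String.ofList [c]))) i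
        = pyTranslate (PySem.Str.slice (PySem.Str.upper seq) (some i) (some (i + 3))) := by
  intro i hi
  rw [PySem.List.mem_pyRange_one] at hi
  obtain ⟨h0, hlt⟩ := hi
  have hlen_eq : PySem.Str.len (PySem.Str.upper seq) = (seq.toList.length : Int) := by
    rw [PySem.Str.len_eq, PySem.Str.toList_upper, PySem.Chars.upper, List.length_map]
  rw [hlen_eq] at hlt
  cases hpre with
  | inl hlen => omega
  | inr hallb =>
      have hall : ∀ c ∈ seq.toList, PySem.Chars.upperChar c ∈ ['A', 'C', 'G', 'T'] :=
        fun c hc => by simpa using List.all_eq_true.mp hallb c hc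
      set j := i.toNat with hj
      have hij : i = (j : Int) := (Int.toNat_of_nonneg h0).symm
      have hwl : (PySem.Str.slice (PySem.Str.upper seq) (some i) (some (i + 3))).toList
          = PySem.List.slice (PySem.Str.upper seq).toList (some i) (some (i + 3)) := by
        simp
      have hww : PySem.List.slice (PySem.Str.upper seq).toList (some i) (some (i + 3))
          = (((PySem.Str.upper seq).toList).drop j).take 3 := by
        rw [hij, show ((j : Int) + 3) = ((j : Int) + ((3 : Nat) : Int)) from by norm_cast]
        exact PySem.List.slice_natCast_add _ j 3
      have hcs : (PySem.Str.upper seq).toList = seq.toList.map PySem.Chars.upperChar := by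
        rw [PySem.Str.toList_upper, PySem.Chars.upper]
      have hlenl : (PySem.Str.upper seq).toList.length = seq.toList.length := by
        rw [hcs, List.length_map]
      have hlen3 : ((((PySem.Str.upper seq).toList).drop j).take 3).length = 3 := by
        rw [List.length_take, List.length_drop, hlenl]
        omega
      obtain ⟨c1, c2, c3, hw3⟩ : ∃ a b c, (((PySem.Str.upper seq).toList).drop j).take 3 = [a, b, c] := by
        match hm : (((PySem.Str.upper seq).toList).drop j).take 3, hlen3 with
        | [a, b, c], _ => exact ⟨a, b, c, rfl⟩
      have hbase : ∀ x ∈ [c1, c2, c3], x ∈ ['A', 'C', 'G', 'T'] := by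
        intro x hx
        have hx' : x ∈ PySem.List.slice (PySem.Str.upper seq).toList (some i) (some (i + 3)) := by
          rw [hww, hw3]; exact hx
        have hxcs := PySem.List.mem_of_mem_slice _ _ _ hx'
        rw [hcs] at hxcs
        obtain ⟨d, hd, hdx⟩ := List.mem_map.mp hxcs
        exact hdx ▸ hall d hd
      have htl : (PySem.Str.upper (PySem.Str.slice (PySem.Str.upper seq) (some i) (some (i + 3)))).toList
          = [c1, c2, c3] := by
        rw [PySem.Str.toList_upper, PySem.Chars.upper, hwl, hww, hw3]
        simp [upperChar_base (hbase c1 (by simp)), upperChar_base (hbase c2 (by simp)),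
          upperChar_base (hbase c3 (by simp))]
      have hup : PySem.Str.upper (PySem.Str.slice (PySem.Str.upper seq) (some i) (some (i + 3)))
          = String.ofList [c1, c2, c3] := by
        rw [← String.ofList_toList
          (s := PySem.Str.upper (PySem.Str.slice (PySem.Str.upper seq) (some i) (some (i + 3)))), htl]
      -- element correspondence: characters of the window at positions j, j+1, j+2
      have hg : ∀ (k : Nat), k < 3 → ((PySem.Str.upper seq).toList)[j + k]? = [c1, c2, c3][k]? := by
        intro k hk
        have h := congrArg (fun xs => xs[k]?) hw3
        simpa [List.getElem?_take, List.getElem?_drop, hk] using h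
      have hg0 : ((PySem.Str.upper seq).toList)[j]? = some c1 := by simpa using hg 0 (by omega)
      have hg1 : ((PySem.Str.upper seq).toList)[j + 1]? = some c2 := by simpa using hg 1 (by omega)
      have hg2 : ((PySem.Str.upper seq).toList)[j + 2]? = some c3 := by simpa using hg 2 (by omega)
      have hc1 : ((j : Int) + 1) = ((j + 1 : Nat) : Int) := by push_cast; ring
      have hc2 : ((j : Int) + 2) = ((j + 2 : Nat) : Int) := by push_cast; ring
      have hg0' : (PySem.Chars.upper seq.toList)[j]? = some c1 := by
        rw [← PySem.Str.toList_upper]; exact hg0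
      have hg1' : (PySem.Chars.upper seq.toList)[j + 1]? = some c2 := by
        rw [← PySem.Str.toList_upper]; exact hg1
      have hg2' : (PySem.Chars.upper seq.toList)[j + 2]? = some c3 := by
        rw [← PySem.Str.toList_upper]; exact hg2
      have hv1 : PySem.List.pyGet?
          ((PySem.Chars.upper seq.toList).map (fun c => PySem.Dict.get? baseDict (String.ofList [c])))
          ((j : Int) + 1) = some (PySem.Dict.get? baseDict (String.ofList [c2])) := by
        rw [hc1, PySem.List.pyGet?_natCast]
        simp [List.getElem?_map, hg1']
      have hv2 : PySem.List.pyGet?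
          ((PySem.Chars.upper seq.toList).map (fun c => PySem.Dict.get? baseDict (String.ofList [c])))
          ((j : Int) + 2) = some (PySem.Dict.get? baseDict (String.ofList [c3])) := by
        rw [hc2, PySem.List.pyGet?_natCast]
        simp [List.getElem?_map, hg2']
      rw [pyTranslate, hup,
        lookup_base_eq c1 (hbase c1 (by simp)) c2 (hbase c2 (by simp)) c3 (hbase c3 (by simp))]
      rw [bAaOf, hij]
      simp [PySem.List.pyGet?_natCast, List.getElem?_map, hg0', hv1, hv2]

-- ===== VERDICT (by name: the statement is the Claim_ definition above) =====
theorem dna_subseq_spec : Claim_equal_dna_subseq := by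
  intro seq aa _ hpre
  unfold Spec_dna_subseq
  set s := PySem.Str.upper seq with hs
  set r := PySem.List.pyRange 0 (PySem.Str.len s - 2) 1 with hr
  set t : Int → Option String := fun i => pyTranslate (PySem.Str.slice s (some i) (some (i + 3))) with ht
  have hsome : ∀ i ∈ r, (t i).isSome = true := pre_isSome seq aa hpre
  have hAeq : dna_subseq seq aa = (List.foldl (fun (st : List String × String) pos =>
      if t pos = some "_" then (st.1 ++ [st.2], "")
      else (st.1, st.2 ++ (t pos).getD "")) ([], "") r).1 := rfl
  have hBeq : dna_subseq_alt seq aa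
      = PySem.List.slice ((PySem.Str.split? (PySem.Str.join ""
          (r.map (fun i => (bAaOf (s.toList.map (fun c => PySem.Dict.get? baseDict (String.ofList [c]))) i).getD ""))) "_").getD []) none (some (-1)) := rfl
  rw [hAeq, hBeq]
  -- B's per-position translation agrees with A's
  have hmapeq : r.map (fun i => (bAaOf (s.toList.map (fun c => PySem.Dict.get? baseDict (String.ofList [c]))) i).getD "")
      = r.map (fun i => (t i).getD "") := by
    refine List.map_congr_left ?_
    intro i hi
    rw [pre_bAaOf_eq seq aa hpre i hi]
  rw [hmapeq]
  -- rewrite A's fold body through (t i).getD ""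
  have hA : (List.foldl (fun (st : List String × String) pos =>
        if t pos = some "_" then (st.1 ++ [st.2], "")
        else (st.1, st.2 ++ (t pos).getD "")) ([], "") r).1
      = (List.foldl (fun (st : List String × String) u =>
        if u = "_" then (st.1 ++ [st.2], "") else (st.1, st.2 ++ u)) ([], "") (r.map (fun i => (t i).getD ""))).1 := by
    rw [List.foldl_map]
    refine congrArg Prod.fst (PySem.List.foldl_congr_mem r _ _ ([], "") ?_)
    intro st x hx
    obtain ⟨u, hu⟩ := Option.isSome_iff_exists.mp (hsome x hx)
    simp [hu]
  rw [hA]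
  have h1 : ∀ u ∈ r.map (fun i => (t i).getD ""), u.toList.length = 1 := by
    intro u hu
    obtain ⟨i, hi, hiu⟩ := List.mem_map.mp hu
    obtain ⟨v, hv⟩ := Option.isSome_iff_exists.mp (hsome i hi)
    have huv : u = v := by rw [← hiu, hv]; rfl
    exact huv ▸ pyTranslate_len _ v hv
  rw [fold_eq_mySplit _ h1 [] ""]
  -- B's side
  have hjoin : PySem.Str.join "" (r.map (fun i => (t i).getD ""))
      = String.ofList (PySem.Chars.join [] ((r.map (fun i => (t i).getD "")).map String.toList)) := by
    rw [PySem.Str.join, show ("" : String).toList = ([] : List Char) from rfl]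
  rw [hjoin]
  have hsplit : PySem.Str.split? (String.ofList (PySem.Chars.join [] ((r.map (fun i => (t i).getD "")).map String.toList))) "_"
      = some (((PySem.Chars.splitOn (PySem.Chars.join [] ((r.map (fun i => (t i).getD "")).map String.toList)) ['_'])).map String.ofList) := by
    rw [PySem.Str.split?, PySem.Chars.split?]
    simp [List.isEmpty_cons, String.toList_ofList]
  rw [hsplit, splitOn_eq_mySplit]
  have hnil : ("" : String).toList = ([] : List Char) := rfl
  simp [PySem.List.slice_to_neg_one, List.map_dropLast, hnil]
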